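-- pv_equiv track=rewrite | github.com/igorvlnascimento/DeepREF | opennre/dataset/converters/converter_ddi.py | get_entity_start_and_end
-- ===== SOURCE A (Python) =====
-- def get_entity_start_and_end(entity_start, entity_end, tokens, upos, deps, ner):
--     e_start = tokens.index(entity_start)
--     e_end = tokens.index(entity_end) - 2 # because 2 tags will be eliminated
--     # only eliminate the entity_start and entity_end once because DRUGUNRELATEDSTART will get
--     # eliminated many times
--     new_tokens = []
--     new_upos = []
--     new_deps = []
--     new_ner = []
--     entity_start_seen = 0
--     entity_end_seen = 0
--     for i, x in enumerate(tokens):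
--         if x == entity_start:
--             entity_start_seen += 1
--         if x == entity_end:
--             entity_end_seen += 1
--         if x == entity_start and entity_start_seen == 1:
--             continue
--         if x == entity_end and entity_end_seen == 1:
--             continue
--         new_tokens.append(x)
--         new_upos.append(upos[i])
--         new_deps.append(deps[i])
--         new_ner.append(ner[i])
--     assert len(new_tokens) == len(new_upos) == len(new_deps) == len(new_ner)
--     return (e_start, e_end), new_tokens, new_upos, new_deps, new_ner
-- ===== SOURCE B (Python) =====
-- def get_entity_start_and_end(entity_start, entity_end, tokens, upos, deps, ner):
--     s = tokens.index(entity_start)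
--     e = tokens.index(entity_end)
--     lo, hi = (s, e) if s <= e else (e, s)
--     n = len(tokens)
--     def cut(xs):
--         return xs[:lo] + xs[lo + 1:hi] + xs[hi + 1:n]
--     return (s, e - 2), cut(tokens), cut(upos), cut(deps), cut(ner)
-- ===== Notes on version B (the rewrite author's own statement) =====
-- stated objective: simpler
-- what changed: B computes the two first-occurrence indices, orders them, and builds each output list as a concatenation of three slices (before lo, between lo and hi, after hi), with no element loop and no occurrence counters.
import Mathlib
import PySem

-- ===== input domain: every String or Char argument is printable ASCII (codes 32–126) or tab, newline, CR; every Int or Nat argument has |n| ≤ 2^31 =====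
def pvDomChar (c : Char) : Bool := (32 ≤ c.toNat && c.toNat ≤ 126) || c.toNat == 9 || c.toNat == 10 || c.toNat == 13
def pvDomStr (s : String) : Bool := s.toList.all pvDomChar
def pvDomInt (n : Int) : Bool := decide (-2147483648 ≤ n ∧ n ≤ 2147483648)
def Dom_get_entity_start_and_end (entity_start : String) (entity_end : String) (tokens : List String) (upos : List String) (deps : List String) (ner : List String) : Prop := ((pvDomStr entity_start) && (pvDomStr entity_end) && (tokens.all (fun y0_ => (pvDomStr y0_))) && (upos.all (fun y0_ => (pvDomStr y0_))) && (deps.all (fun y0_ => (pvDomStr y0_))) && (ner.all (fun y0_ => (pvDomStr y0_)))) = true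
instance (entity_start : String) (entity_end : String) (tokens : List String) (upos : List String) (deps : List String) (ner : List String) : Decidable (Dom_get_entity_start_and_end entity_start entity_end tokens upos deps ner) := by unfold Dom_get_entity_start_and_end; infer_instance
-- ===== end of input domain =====

-- B replaces A's element loop with running occurrence counters by two precomputed
-- first-occurrence indices and a closed-form three-slice concatenation per list (objective: simpler).

-- ===== PORT A =====
-- A's loop body: counters are incremented first, then the two 'continue' guards, then the appends.
def pvStepA (s e : String) (upos deps ner : List String)
    (st : (List String × List String × List String × List String) × Int × Int) (p : Int × String) :
    (List String × List String × List String × List String) × Int × Int :=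
  let ss := if p.2 = s then st.2.1 + 1 else st.2.1
  let es := if p.2 = e then st.2.2 + 1 else st.2.2
  if p.2 = s ∧ ss = 1 then (st.1, ss, es)
  else if p.2 = e ∧ es = 1 then (st.1, ss, es)
  else ((st.1.1 ++ [p.2],
         st.1.2.1 ++ [(PySem.List.pyGet? upos p.1).getD ""],
         st.1.2.2.1 ++ [(PySem.List.pyGet? deps p.1).getD ""],
         st.1.2.2.2 ++ [(PySem.List.pyGet? ner p.1).getD ""]), ss, es)

def get_entity_start_and_end (entity_start : String) (entity_end : String) (tokens : List String) (upos : List String) (deps : List String) (ner : List String) : (Int × Int) × List String × List String × List String × List String :=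
  match PySem.List.index? tokens entity_start, PySem.List.index? tokens entity_end with
  | some ks, some ke =>
    let r := (PySem.List.enumerate tokens).foldl (pvStepA entity_start entity_end upos deps ner)
               (([], [], [], []), 0, 0)
    (((ks : Int), (ke : Int) - 2), r.1.1, r.1.2.1, r.1.2.2.1, r.1.2.2.2)
  | _, _ => ((0, 0), [], [], [], [])   -- tokens.index raised ValueError; outside Pre_

-- ===== PORT B =====
-- B's helper cut: xs[:lo] + xs[lo+1:hi] + xs[hi+1:n]
def pvCut (lo hi : Nat) (n : Int) (xs : List String) : List String :=
  PySem.List.slice xs none (some (lo : Int))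
  ++ PySem.List.slice xs (some ((lo : Int) + 1)) (some (hi : Int))
  ++ PySem.List.slice xs (some ((hi : Int) + 1)) (some n)

def get_entity_start_and_end_alt (entity_start : String) (entity_end : String) (tokens : List String) (upos : List String) (deps : List String) (ner : List String) : (Int × Int) × List String × List String × List String × List String :=
  match PySem.List.index? tokens entity_start with
  | none => ((0, 0), [], [], [], [])   -- tokens.index raised ValueError; outside Pre_
  | some s =>
    match PySem.List.index? tokens entity_end with
    | none => ((0, 0), [], [], [], [])   -- tokens.index raised ValueError; outside Pre_
    | some e =>
      let lohi := if s ≤ e then (s, e) else (e, s)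
      let n : Int := (tokens.length : Int)
      (((s : Int), (e : Int) - 2),
       pvCut lohi.1 lohi.2 n tokens, pvCut lohi.1 lohi.2 n upos,
       pvCut lohi.1 lohi.2 n deps, pvCut lohi.1 lohi.2 n ner)

-- ===== PRECONDITION & SPEC =====
-- Pre_ excludes exactly the inputs where the Python A raises: ValueError when either entity tag
-- is absent from tokens, IndexError when some kept index falls beyond upos/deps/ner.
def Pre_get_entity_start_and_end (entity_start : String) (entity_end : String) (tokens : List String) (upos : List String) (deps : List String) (ner : List String) : Prop :=
  entity_start ∈ tokens ∧ entity_end ∈ tokens ∧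
  ∀ i : Nat, i < tokens.length → i ≠ tokens.idxOf entity_start → i ≠ tokens.idxOf entity_end →
    (i < upos.length ∧ i < deps.length ∧ i < ner.length)
instance (entity_start : String) (entity_end : String) (tokens : List String) (upos : List String) (deps : List String) (ner : List String) : Decidable (Pre_get_entity_start_and_end entity_start entity_end tokens upos deps ner) := by unfold Pre_get_entity_start_and_end; infer_instance

def pvWitness_get_entity_start_and_end : String × String × List String × List String × List String × List String :=
  ("S", "E", ["S", "a", "E"], ["u1", "u2", "u3"], ["d1", "d2", "d3"], ["n1", "n2", "n3"])

def Spec_get_entity_start_and_end (entity_start : String) (entity_end : String) (tokens : List String) (upos : List String) (deps : List String) (ner : List String) (out : (Int × Int) × List String × List String × List String × List String) : Prop := out = get_entity_start_and_end_alt entity_start entity_end tokens upos deps ner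
instance (entity_start : String) (entity_end : String) (tokens : List String) (upos : List String) (deps : List String) (ner : List String) (out : (Int × Int) × List String × List String × List String × List String) : Decidable (Spec_get_entity_start_and_end entity_start entity_end tokens upos deps ner out) := by unfold Spec_get_entity_start_and_end; infer_instance

-- ===== CLAIM (what is proved, stated in full; the proofs are below) =====
def Claim_equal_get_entity_start_and_end : Prop := ∀ (entity_start : String) (entity_end : String) (tokens : List String) (upos : List String) (deps : List String) (ner : List String), Dom_get_entity_start_and_end entity_start entity_end tokens upos deps ner → Pre_get_entity_start_and_end entity_start entity_end tokens upos deps ner → Spec_get_entity_start_and_end entity_start entity_end tokens upos deps ner (get_entity_start_and_end entity_start entity_end tokens upos deps ner)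

-- ===== LEMMAS AND PROOFS =====

-- the kept (absolute) indices of the window starting at st of length n
def pvKept (ks ke st n : Nat) : List Nat :=
  (List.range' st n).filter (fun i => !(i == ks || i == ke))

lemma pv_witness_ok :
    Dom_get_entity_start_and_end (pvWitness_get_entity_start_and_end.1) (pvWitness_get_entity_start_and_end.2.1) (pvWitness_get_entity_start_and_end.2.2.1) (pvWitness_get_entity_start_and_end.2.2.2.1) (pvWitness_get_entity_start_and_end.2.2.2.2.1) (pvWitness_get_entity_start_and_end.2.2.2.2.2) ∧
    Pre_get_entity_start_and_end (pvWitness_get_entity_start_and_end.1) (pvWitness_get_entity_start_and_end.2.1) (pvWitness_get_entity_start_and_end.2.2.1) (pvWitness_get_entity_start_and_end.2.2.2.1) (pvWitness_get_entity_start_and_end.2.2.2.2.1) (pvWitness_get_entity_start_and_end.2.2.2.2.2) := by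
  constructor <;> decide

-- first-occurrence characterisation: the head of the unprocessed suffix is the (unique) first
-- occurrence of v iff its absolute position equals the index returned by tokens.index(v)
lemma pv_first_occ {tokens pre rest : List String} {x v : String} {k : Nat}
    (ht : tokens = pre ++ x :: rest) (hk : PySem.List.index? tokens v = some k) :
    (x = v ∧ v ∉ pre) ↔ pre.length = k := by
  obtain ⟨hklt, hkv, hfirst⟩ := PySem.List.getElem_of_index?_eq_some hk
  subst ht
  have hlen : pre.length < (pre ++ x :: rest).length := by simp
  have hx : (pre ++ x :: rest)[pre.length] = x := by
    rw [List.getElem_append_right (le_refl pre.length)]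
    simp
  constructor
  · rintro ⟨rfl, hnv⟩
    rcases lt_trichotomy pre.length k with h | h | h
    · exact absurd (hx ▸ hfirst pre.length h) (by simp)
    · exact h
    · exfalso
      have hpk : pre[k]'h = x := (List.getElem_append_left h).symm.trans hkv
      exact hnv (hpk ▸ List.getElem_mem h)
  · intro hlk
    subst hlk
    refine ⟨by rw [← hx, hkv], fun hmem => ?_⟩
    obtain ⟨j, hj, hjv⟩ := List.getElem_of_mem hmem
    have : (pre ++ x :: rest)[j]'(by simp; omega) = pre[j] := List.getElem_append_left hj
    exact hfirst j hj (this ▸ hjv)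

-- one step of A's loop, characterised by the two first-occurrence indices
lemma pv_stepA_char (s e : String) (upos deps ner : List String)
    {tokens pre rest : List String} {x : String} {ks ke : Nat}
    (ht : tokens = pre ++ x :: rest)
    (hs : PySem.List.index? tokens s = some ks) (he : PySem.List.index? tokens e = some ke)
    (a1 a2 a3 a4 : List String) :
    pvStepA s e upos deps ner ((a1, a2, a3, a4), ((pre.count s : Int), (pre.count e : Int)))
        ((pre.length : Int), x)
    = ((if pre.length = ks ∨ pre.length = ke then (a1, a2, a3, a4)
        else (a1 ++ [x],
              a2 ++ [(PySem.List.pyGet? upos (pre.length : Int)).getD ""],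
              a3 ++ [(PySem.List.pyGet? deps (pre.length : Int)).getD ""],
              a4 ++ [(PySem.List.pyGet? ner (pre.length : Int)).getD ""])),
       (((pre ++ [x]).count s : Int), ((pre ++ [x]).count e : Int))) := by
  have hcs : ((pre ++ [x]).count s : Int) = (if x = s then (pre.count s : Int) + 1 else (pre.count s : Int)) := by
    simp [List.count_append, List.count_singleton]
    split_ifs <;> simp_all [eq_comm]
  have hce : ((pre ++ [x]).count e : Int) = (if x = e then (pre.count e : Int) + 1 else (pre.count e : Int)) := by
    simp [List.count_append, List.count_singleton]
    split_ifs <;> simp_all [eq_comm]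
  have hks : (x = s ∧ (if x = s then (pre.count s : Int) + 1 else (pre.count s : Int)) = 1) ↔ pre.length = ks := by
    rw [← pv_first_occ ht hs]
    constructor
    · rintro ⟨rfl, hc⟩
      rw [if_pos rfl] at hc
      exact ⟨rfl, by rw [← List.count_eq_zero (a := x)]; omega⟩
    · rintro ⟨rfl, hnv⟩
      have : pre.count x = 0 := List.count_eq_zero.mpr hnv
      simp [this]
  have hke : (x = e ∧ (if x = e then (pre.count e : Int) + 1 else (pre.count e : Int)) = 1) ↔ pre.length = ke := by
    rw [← pv_first_occ ht he]
    constructor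
    · rintro ⟨rfl, hc⟩
      rw [if_pos rfl] at hc
      exact ⟨rfl, by rw [← List.count_eq_zero (a := x)]; omega⟩
    · rintro ⟨rfl, hnv⟩
      have : pre.count x = 0 := List.count_eq_zero.mpr hnv
      simp [this]
  simp only [pvStepA, hcs, hce]
  split_ifs <;> simp_all

-- A's whole loop, generalised over the processed prefix and the accumulators
lemma pv_loopA (s e : String) (upos deps ner tokens : List String) {ks ke : Nat}
    (hs : PySem.List.index? tokens s = some ks) (he : PySem.List.index? tokens e = some ke) :
    ∀ (rest pre : List String), tokens = pre ++ rest →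
      ∀ (a1 a2 a3 a4 : List String),
      (PySem.List.enumerate rest (pre.length : Int)).foldl (pvStepA s e upos deps ner)
          ((a1, a2, a3, a4), ((pre.count s : Int), (pre.count e : Int)))
      = ((a1 ++ (pvKept ks ke pre.length rest.length).map (fun (i : Nat) => (PySem.List.pyGet? tokens (i : Int)).getD ""),
          a2 ++ (pvKept ks ke pre.length rest.length).map (fun (i : Nat) => (PySem.List.pyGet? upos (i : Int)).getD ""),
          a3 ++ (pvKept ks ke pre.length rest.length).map (fun (i : Nat) => (PySem.List.pyGet? deps (i : Int)).getD ""),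
          a4 ++ (pvKept ks ke pre.length rest.length).map (fun (i : Nat) => (PySem.List.pyGet? ner (i : Int)).getD "")),
         ((tokens.count s : Int), (tokens.count e : Int))) := by
  intro rest
  induction rest with
  | nil =>
    intro pre ht a1 a2 a3 a4
    simp [PySem.List.enumerate_nil, pvKept, ht]
  | cons x rest ih =>
    intro pre ht a1 a2 a3 a4
    rw [PySem.List.enumerate_cons, List.foldl_cons, pv_stepA_char s e upos deps ner ht hs he]
    have hx : (PySem.List.pyGet? tokens (pre.length : Int)).getD "" = x := by
      rw [ht, PySem.List.pyGet?_append_length]; rfl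
    have hstep : ((pre.length : Int) + 1) = (((pre ++ [x]).length : Int)) := by
      simp
    have ht' : tokens = (pre ++ [x]) ++ rest := by simp [ht]
    have hkept : pvKept ks ke pre.length (x :: rest).length
        = (if pre.length = ks ∨ pre.length = ke then [] else [pre.length])
            ++ pvKept ks ke (pre.length + 1) rest.length := by
      rw [pvKept, pvKept, List.length_cons, List.range'_succ, List.filter_cons]
      split_ifs <;> simp_all
    rw [hstep]
    rw [ih (pre ++ [x]) ht' _ _ _ _]
    have hlen : (pre ++ [x]).length = pre.length + 1 := by simp
    have hx2 : tokens[pre.length]?.getD "" = x := by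
      rw [ht, List.getElem?_append_right (le_refl _)]
      simp
    rw [hlen, hkept]
    split_ifs with h <;> simp [hx2]

-- a block of in-range indices read off by pyGet? is a drop/take block
lemma pv_map_get_range' (xs : List String) :
    ∀ (k a : Nat), a + k ≤ xs.length →
      (List.range' a k).map (fun (i : Nat) => (PySem.List.pyGet? xs (i : Int)).getD "")
      = (xs.drop a).take k := by
  intro k
  induction k with
  | zero => intro a _; simp
  | succ k ih =>
    intro a h
    have ha : a < xs.length := by omega
    rw [List.range'_succ, List.map_cons, ih (a + 1) (by omega),
        List.drop_eq_getElem_cons ha, List.take_succ_cons]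
    simp [List.getElem?_eq_getElem ha]

-- gluing adjacent ranges
lemma pv_glue {a b c d : Nat} (h : c = a + b) :
    List.range' a b ++ List.range' c d = List.range' a (b + d) := by
  subst h
  exact List.range'_append_1

-- splitting the kept indices of [0, n) around lo ≤ hi < n into three intervals
lemma pv_kept_split (lo hi n : Nat) (hlh : lo ≤ hi) (hhi : hi < n) :
    (List.range' 0 n).filter (fun i => !(i == lo || i == hi))
    = List.range' 0 lo ++ List.range' (lo + 1) (hi - (lo + 1)) ++ List.range' (hi + 1) (n - (hi + 1)) := by
  have f1 : (List.range' 0 lo).filter (fun i => !(i == lo || i == hi)) = List.range' 0 lo := by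
    apply List.filter_eq_self.mpr
    intro a ha
    have hb := List.mem_range'_1.mp ha
    have n1 : a ≠ lo := by omega
    have n2 : a ≠ hi := by omega
    simp [n1, n2]
  have f3 : (List.range' (lo + 1) (hi - (lo + 1))).filter (fun i => !(i == lo || i == hi))
      = List.range' (lo + 1) (hi - (lo + 1)) := by
    apply List.filter_eq_self.mpr
    intro a ha
    have hb := List.mem_range'_1.mp ha
    have n1 : a ≠ lo := by omega
    have n2 : a ≠ hi := by omega
    simp [n1, n2]
  have f5 : (List.range' (hi + 1) (n - (hi + 1))).filter (fun i => !(i == lo || i == hi))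
      = List.range' (hi + 1) (n - (hi + 1)) := by
    apply List.filter_eq_self.mpr
    intro a ha
    have hb := List.mem_range'_1.mp ha
    have n1 : a ≠ lo := by omega
    have n2 : a ≠ hi := by omega
    simp [n1, n2]
  rcases Nat.eq_or_lt_of_le hlh with rfl | hlt
  · have hdec : List.range' 0 n
        = List.range' 0 lo ++ List.range' lo 1 ++ List.range' (lo + 1) (n - (lo + 1)) := by
      have e1 : List.range' 0 lo ++ List.range' lo 1 = List.range' 0 (lo + 1) := by
        rw [pv_glue (by omega)]
      have e4 : List.range' 0 (lo + 1) ++ List.range' (lo + 1) (n - (lo + 1)) = List.range' 0 n := by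
        rw [pv_glue (by omega)]; congr 1; omega
      rw [e1, e4]
    have hz : lo - (lo + 1) = 0 := by omega
    rw [hdec, hz]
    simp only [List.filter_append, List.range'_zero]
    rw [f1, f5]
    simp
  · have hdec : List.range' 0 n
        = List.range' 0 lo ++ List.range' lo 1 ++ List.range' (lo + 1) (hi - (lo + 1))
          ++ List.range' hi 1 ++ List.range' (hi + 1) (n - (hi + 1)) := by
      have e1 : List.range' 0 lo ++ List.range' lo 1 = List.range' 0 (lo + 1) := by
        rw [pv_glue (by omega)]
      have e2 : List.range' 0 (lo + 1) ++ List.range' (lo + 1) (hi - (lo + 1)) = List.range' 0 hi := by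
        rw [pv_glue (by omega)]; congr 1; omega
      have e3 : List.range' 0 hi ++ List.range' hi 1 = List.range' 0 (hi + 1) := by
        rw [pv_glue (by omega)]
      have e4 : List.range' 0 (hi + 1) ++ List.range' (hi + 1) (n - (hi + 1)) = List.range' 0 n := by
        rw [pv_glue (by omega)]; congr 1; omega
      rw [e1, e2, e3, e4]
    rw [hdec]
    simp only [List.filter_append]
    rw [f1, f3, f5]
    have n1 : lo ≠ hi := by omega
    simp

-- B's cut equals reading off the three kept-index blocks, given the bounds Pre_ supplies
lemma pv_cut_eq (xs : List String) (lo hi n : Nat) (hlh : lo ≤ hi) (hhn : hi < n)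
    (h1 : lo ≤ xs.length) (h2 : lo + 1 < hi → hi ≤ xs.length) (h3 : hi + 1 < n → n ≤ xs.length) :
    (List.range' 0 lo ++ List.range' (lo + 1) (hi - (lo + 1)) ++ List.range' (hi + 1) (n - (hi + 1))).map
        (fun (i : Nat) => (PySem.List.pyGet? xs (i : Int)).getD "")
    = pvCut lo hi (n : Int) xs := by
  have c1 : PySem.List.slice xs none (some (lo : Int)) = xs.take lo :=
    PySem.List.slice_to_natCast xs lo
  have c2 : PySem.List.slice xs (some ((lo : Int) + 1)) (some (hi : Int))
      = (xs.drop (lo + 1)).take (hi - (lo + 1)) := by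
    have : ((lo : Int) + 1) = ((lo + 1 : Nat) : Int) := by push_cast; ring
    rw [this, PySem.List.slice_natCast]
  have c3 : PySem.List.slice xs (some ((hi : Int) + 1)) (some (n : Int))
      = (xs.drop (hi + 1)).take (n - (hi + 1)) := by
    have : ((hi : Int) + 1) = ((hi + 1 : Nat) : Int) := by push_cast; ring
    rw [this, PySem.List.slice_natCast]
  rw [pvCut, c1, c2, c3, List.map_append, List.map_append]
  congr 1
  · congr 1
    · have := pv_map_get_range' xs lo 0 (by omega)
      simpa using this
    · rcases Nat.lt_or_ge (lo + 1) hi with h | h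
      · have hb : lo + 1 + (hi - (lo + 1)) ≤ xs.length := by
          have := h2 h; omega
        exact pv_map_get_range' xs (hi - (lo + 1)) (lo + 1) hb
      · have hz : hi - (lo + 1) = 0 := by omega
        simp [hz]
  · rcases Nat.lt_or_ge (hi + 1) n with h | h
    · have hb : hi + 1 + (n - (hi + 1)) ≤ xs.length := by
        have := h3 h; omega
      exact pv_map_get_range' xs (n - (hi + 1)) (hi + 1) hb
    · have hz : n - (hi + 1) = 0 := by omega
      simp [hz]

-- tokens.index(v) = some k determines List.idxOf
lemma pv_idxOf_eq {xs : List String} {v : String} {k : Nat}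
    (h : PySem.List.index? xs v = some k) : xs.idxOf v = k := by
  obtain ⟨pre, suf, rfl, hlen, hnv⟩ := (PySem.List.index?_eq_some_iff _ _ _).mp h
  rw [List.idxOf_append_of_notMem hnv, List.idxOf_cons_self]
  omega

-- ===== VERDICT (by name: the statement is the Claim_ definition above) =====
theorem get_entity_start_and_end_spec : Claim_equal_get_entity_start_and_end := by
  intro s e tokens upos deps ner _ hpre
  unfold Spec_get_entity_start_and_end
  unfold get_entity_start_and_end get_entity_start_and_end_alt
  cases hs : PySem.List.index? tokens s with
  | none => cases he : PySem.List.index? tokens e <;> rfl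
  | some ks =>
    cases he : PySem.List.index? tokens e with
    | none => rfl
    | some ke =>
      simp only
      obtain ⟨hks, -, -⟩ := PySem.List.getElem_of_index?_eq_some hs
      obtain ⟨hke, -, -⟩ := PySem.List.getElem_of_index?_eq_some he
      obtain ⟨-, -, hbound⟩ := hpre
      rw [pv_idxOf_eq hs, pv_idxOf_eq he] at hbound
      have hA := pv_loopA s e upos deps ner tokens hs he tokens [] (by simp) [] [] [] []
      simp only [List.length_nil, Nat.cast_zero, List.count_nil, List.nil_append] at hA
      rw [hA]
      -- order the two skip indices
      have key : ∀ (lo hi : Nat), lo ≤ hi →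
          (∀ i : Nat, i < tokens.length → i ≠ lo → i ≠ hi →
            (i < upos.length ∧ i < deps.length ∧ i < ner.length)) →
          hi < tokens.length → lo < tokens.length →
          (pvKept lo hi 0 tokens.length).map (fun (i : Nat) => (PySem.List.pyGet? tokens (i : Int)).getD "")
            = pvCut lo hi (tokens.length : Int) tokens ∧
          (pvKept lo hi 0 tokens.length).map (fun (i : Nat) => (PySem.List.pyGet? upos (i : Int)).getD "")
            = pvCut lo hi (tokens.length : Int) upos ∧
          (pvKept lo hi 0 tokens.length).map (fun (i : Nat) => (PySem.List.pyGet? deps (i : Int)).getD "")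
            = pvCut lo hi (tokens.length : Int) deps ∧
          (pvKept lo hi 0 tokens.length).map (fun (i : Nat) => (PySem.List.pyGet? ner (i : Int)).getD "")
            = pvCut lo hi (tokens.length : Int) ner := by
        intro lo hi hlh hb hhiT hloT
        have hsplit := pv_kept_split lo hi tokens.length hlh hhiT
        have hx1 : lo = 0 ∨ (lo - 1 < tokens.length ∧ lo - 1 ≠ lo ∧ lo - 1 ≠ hi) := by
          rcases Nat.eq_zero_or_pos lo with h | h
          · exact Or.inl h
          · exact Or.inr ⟨by omega, by omega, by omega⟩
        have bound1 : ∀ (ys : List String), (∀ i : Nat, i < tokens.length → i ≠ lo → i ≠ hi → i < ys.length) →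
            lo ≤ ys.length := by
          intro ys hys
          rcases hx1 with h | ⟨ha, hb1, hc⟩
          · omega
          · have := hys (lo - 1) ha hb1 hc; omega
        have bound2 : ∀ (ys : List String), (∀ i : Nat, i < tokens.length → i ≠ lo → i ≠ hi → i < ys.length) →
            lo + 1 < hi → hi ≤ ys.length := by
          intro ys hys h
          have := hys (hi - 1) (by omega) (by omega) (by omega); omega
        have bound3 : ∀ (ys : List String), (∀ i : Nat, i < tokens.length → i ≠ lo → i ≠ hi → i < ys.length) →
            hi + 1 < tokens.length → tokens.length ≤ ys.length := by
          intro ys hys h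
          have := hys (tokens.length - 1) (by omega) (by omega) (by omega); omega
        refine ⟨?_, ?_, ?_, ?_⟩
        · rw [pvKept, hsplit]
          exact pv_cut_eq tokens lo hi tokens.length hlh hhiT (by omega) (fun _ => by omega) (fun _ => by omega)
        · rw [pvKept, hsplit]
          exact pv_cut_eq upos lo hi tokens.length hlh hhiT
            (bound1 upos (fun i h1 h2 h3 => (hb i h1 h2 h3).1))
            (bound2 upos (fun i h1 h2 h3 => (hb i h1 h2 h3).1))
            (bound3 upos (fun i h1 h2 h3 => (hb i h1 h2 h3).1))
        · rw [pvKept, hsplit]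
          exact pv_cut_eq deps lo hi tokens.length hlh hhiT
            (bound1 deps (fun i h1 h2 h3 => (hb i h1 h2 h3).2.1))
            (bound2 deps (fun i h1 h2 h3 => (hb i h1 h2 h3).2.1))
            (bound3 deps (fun i h1 h2 h3 => (hb i h1 h2 h3).2.1))
        · rw [pvKept, hsplit]
          exact pv_cut_eq ner lo hi tokens.length hlh hhiT
            (bound1 ner (fun i h1 h2 h3 => (hb i h1 h2 h3).2.2))
            (bound2 ner (fun i h1 h2 h3 => (hb i h1 h2 h3).2.2))
            (bound3 ner (fun i h1 h2 h3 => (hb i h1 h2 h3).2.2))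
      by_cases hord : ks ≤ ke
      · have hif : (if ks ≤ ke then (ks, ke) else (ke, ks)) = (ks, ke) := if_pos hord
        rw [hif]
        obtain ⟨e1, e2, e3, e4⟩ := key ks ke hord (fun i h1 h2 h3 => hbound i h1 h2 h3) hke hks
        simp only [e1, e2, e3, e4]
      · have hif : (if ks ≤ ke then (ks, ke) else (ke, ks)) = (ke, ks) := if_neg hord
        rw [hif]
        have hcomm : pvKept ks ke 0 tokens.length = pvKept ke ks 0 tokens.length := by
          rw [pvKept, pvKept]
          apply List.filter_congr
          intro i _
          rw [Bool.or_comm]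
        rw [hcomm]
        obtain ⟨e1, e2, e3, e4⟩ := key ke ks (by omega) (fun i h1 h2 h3 => hbound i h1 h3 h2) hks hke
        simp only [e1, e2, e3, e4]
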